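-- pv_equiv track=rewrite | github.com/renjieliu/leetcode | 2000_2499/2437.py | countTime
-- ===== SOURCE A (Python) =====
-- def countTime(time: str) -> int: # O( 1440 | 1440 )
--     total = set()
--     for i in range(24): # all the possible time
--         for j in range(60):
--             total.add( ("0" if i < 10 else "") + str(i) + ":" + ("0" if j < 10 else "") + str(j))
--     cnt = 0
--     loc = []
--     for i, t in enumerate(time): #find the loc in time where it's not ?
--         if t != "?":
--             loc.append(i)
--
--     for curr in total:
--         cnt += all( curr[i] == time[i] for i in loc) # all the non ? location in the time is same as current
--
--     return cnt
-- ===== SOURCE B (Python) =====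
-- def countTime(time: str) -> int:
--     # Combinatorial: valid hour choices x colon match x valid minute choices.
--     p = (time + "?????")[:5]
--     hours = sum(1 for h in range(24)
--                 if p[0] in ("?", str(h // 10)) and p[1] in ("?", str(h % 10)))
--     minutes = sum(1 for m in range(60)
--                   if p[3] in ("?", str(m // 10)) and p[4] in ("?", str(m % 10)))
--     colon = 1 if p[2] in ("?", ":") else 0
--     return hours * colon * minutes
-- ===== Notes on version B (the rewrite author's own statement) =====
-- stated objective: faster
-- what changed: Replaces enumerating all 1440 times into a set and testing each against the pattern by a combinatorial product: count matching hour choices (24 checks) times colon match times matching minute choices (60 checks).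
import Mathlib
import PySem

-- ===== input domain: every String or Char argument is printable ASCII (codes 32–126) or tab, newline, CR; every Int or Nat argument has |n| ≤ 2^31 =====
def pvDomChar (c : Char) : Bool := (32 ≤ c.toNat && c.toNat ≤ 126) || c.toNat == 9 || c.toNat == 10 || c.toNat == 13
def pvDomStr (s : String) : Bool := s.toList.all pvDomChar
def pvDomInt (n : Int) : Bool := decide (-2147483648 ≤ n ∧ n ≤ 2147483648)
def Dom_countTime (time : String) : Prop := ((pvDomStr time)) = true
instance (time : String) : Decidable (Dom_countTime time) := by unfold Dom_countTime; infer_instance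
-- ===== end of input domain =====

-- B replaces A's scan of the full 1440-element set of times by a combinatorial product
-- (matching hours × colon × matching minutes); equivalence is proved on Pre_ (where A returns).

-- ===== PORT A =====
-- Strings are carried as List Char (PySem.Chars view) so the kernel can unfold concatenation.
-- ("0" if i < 10 else "") + str(i) + ":" + ("0" if j < 10 else "") + str(j)
def pvHHMM (i j : Int) : List Char :=
  (if i < 10 then ['0'] else []) ++ PySem.Int.toChars i ++ [':'] ++
    (if j < 10 then ['0'] else []) ++ PySem.Int.toChars j

-- 'for curr in total' iterates a Python set in hash order; the loop only SUMS a 0/1 per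
-- element, so the result is order-independent and folding the PySem.Set list is exact.
-- curr[i] for i ≥ 5 raises IndexError in Python; pyGet? is none there (those inputs are
-- exactly the ones Pre_countTime excludes).
def countTime (time : String) : Int :=
  let total : PySem.Set (List Char) :=
    (PySem.List.pyRange 0 24 1).foldl (fun s i =>
      (PySem.List.pyRange 0 60 1).foldl (fun s j => PySem.Set.add s (pvHHMM i j)) s)
      PySem.Set.empty
  let loc : List Int :=
    (PySem.List.enumerate time.toList 0).foldl
      (fun l p => if p.2 != '?' then l ++ [p.1] else l) []
  total.foldl (fun cnt curr =>
    cnt + (if loc.all (fun i =>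
        PySem.List.pyGet? curr i == PySem.List.pyGet? time.toList i) then 1 else 0)) 0

-- ===== PORT B =====
-- p[k] in ("?", s)  (s a 1-character string)
def pvIn2 (c : Char) (ds : List Char) : Bool := ([c] == ['?']) || ([c] == ds)

-- p = (time + "?????")[:5] always has 5 characters, so p[k] (k ≤ 4) cannot fail: getD is exact.
def countTime_alt (time : String) : Int :=
  let p : List Char := PySem.List.slice (time.toList ++ ['?','?','?','?','?']) none (some 5)
  let hours : Int := ((PySem.List.pyRange 0 24 1).countP (fun h =>
      pvIn2 (p.getD 0 '?') (PySem.Int.toChars (PySem.Int.floordiv h 10)) &&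
      pvIn2 (p.getD 1 '?') (PySem.Int.toChars (PySem.Int.mod h 10))) : Int)
  let minutes : Int := ((PySem.List.pyRange 0 60 1).countP (fun m =>
      pvIn2 (p.getD 3 '?') (PySem.Int.toChars (PySem.Int.floordiv m 10)) &&
      pvIn2 (p.getD 4 '?') (PySem.Int.toChars (PySem.Int.mod m 10))) : Int)
  let colon : Int := if pvIn2 (p.getD 2 '?') [':'] then 1 else 0
  hours * colon * minutes

-- ===== PRECONDITION & SPEC =====
-- char-class test: some hour 0..23 is compatible with pattern characters c0 c1
def pvSatHour (c0 c1 : Char) : Bool :=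
  (c0 == '?' || c0 == '0' || c0 == '1' || c0 == '2') &&
  (c1 == '?' || ('0' ≤ c1 && c1 ≤ '9')) &&
  (!(c0 == '2') || (c1 == '?' || c1 == '0' || c1 == '1' || c1 == '2' || c1 == '3'))

-- some minute 0..59 is compatible with c3 c4
def pvSatMin (c3 c4 : Char) : Bool :=
  (c3 == '?' || ('0' ≤ c3 && c3 ≤ '5')) && (c4 == '?' || ('0' ≤ c4 && c4 ≤ '9'))

-- some time "HH:MM" is compatible with the first five pattern characters (missing = '?')
def pvSat (l : List Char) : Bool :=
  pvSatHour (l.getD 0 '?') (l.getD 1 '?') &&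
  (l.getD 2 '?' == '?' || l.getD 2 '?' == ':') &&
  pvSatMin (l.getD 3 '?') (l.getD 4 '?')

-- Pre_ excludes exactly the strings on which A raises IndexError: those with a non-'?'
-- character at an index ≥ 5 while the first five positions are still satisfiable by some
-- time — there all(...) reaches curr[i] with i ≥ 5.
def Pre_countTime (time : String) : Prop :=
  (time.toList.drop 5).all (· == '?') = true ∨ pvSat time.toList = false
instance (time : String) : Decidable (Pre_countTime time) := by
  unfold Pre_countTime; infer_instance

def pvWitness_countTime : String := "1?:5?"

def Spec_countTime (time : String) (out : Int) : Prop := out = countTime_alt time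
instance (time : String) (out : Int) : Decidable (Spec_countTime time out) := by
  unfold Spec_countTime; infer_instance

-- ===== CLAIM (what is proved, stated in full; the proofs are below) =====
def Claim_equal_countTime : Prop :=
  ∀ (time : String), Dom_countTime time → Pre_countTime time →
    Spec_countTime time (countTime time)

-- ===== LEMMAS AND PROOFS =====

-- digit character of n (used for the canonical spelling of A's generated time strings)
def pvD (n : Int) : Char := Char.ofNat (48 + n.toNat)

def pvCanon (i j : Int) : List Char :=
  [pvD (PySem.Int.floordiv i 10), pvD (PySem.Int.mod i 10), ':',
   pvD (PySem.Int.floordiv j 10), pvD (PySem.Int.mod j 10)]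

def pvAllT : List (List Char) :=
  (PySem.List.pyRange 0 24 1).flatMap (fun i => (PySem.List.pyRange 0 60 1).map (pvCanon i))

def pvKey (cs : List Char) : Int :=
  ((cs.getD 0 ' ').toNat * 10 + (cs.getD 1 ' ').toNat) * 60 +
    (cs.getD 3 ' ').toNat * 10 + (cs.getD 4 ' ').toNat

def pvM (t c : Char) : Bool := t == '?' || t == c

def pvHourP (t0 t1 : Char) (h : Int) : Bool :=
  pvM t0 (pvD (PySem.Int.floordiv h 10)) && pvM t1 (pvD (PySem.Int.mod h 10))

def pvMinP (t3 t4 : Char) (m : Int) : Bool :=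
  pvM t3 (pvD (PySem.Int.floordiv m 10)) && pvM t4 (pvD (PySem.Int.mod m 10))

-- A's hand-built strings are the canonical 5-character spellings
theorem pv_hhmm_canon : ∀ i ∈ PySem.List.pyRange 0 24 1, ∀ j ∈ PySem.List.pyRange 0 60 1,
    pvHHMM i j = pvCanon i j := by decide

set_option maxRecDepth 10000 in
theorem pv_key_allT : pvAllT.map pvKey = PySem.List.pyRange 32208 33648 1 := by decide

theorem pv_nodup_allT : pvAllT.Nodup :=
  (pv_key_allT ▸ PySem.List.nodup_pyRange_one 32208 33648).of_map

theorem pv_foldl_update {g : Int → List (List Char)} :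
    ∀ (L : List Int) (s : PySem.Set (List Char)),
      L.foldl (fun s i => PySem.Set.update s (g i)) s = PySem.Set.update s (L.flatMap g)
  | [], s => by simp [PySem.Set.update]
  | i :: L, s => by
    simp only [List.foldl_cons, List.flatMap_cons, PySem.Set.update_append]
    exact pv_foldl_update L _

-- the 1440-element set A builds, as a list: exactly pvAllT
theorem pv_total_eq :
    ((PySem.List.pyRange 0 24 1).foldl (fun s i =>
      (PySem.List.pyRange 0 60 1).foldl (fun s j => PySem.Set.add s (pvHHMM i j)) s)
      PySem.Set.empty) = pvAllT := by
  have h1 : ∀ (s : PySem.Set (List Char)), ∀ i ∈ PySem.List.pyRange 0 24 1,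
      (PySem.List.pyRange 0 60 1).foldl (fun s j => PySem.Set.add s (pvHHMM i j)) s
        = PySem.Set.update s ((PySem.List.pyRange 0 60 1).map (pvCanon i)) := by
    intro s i hi
    rw [PySem.Set.update_map_eq_foldl_add]
    exact (PySem.List.foldl_congr_mem _ _ _ _ (fun acc j hj => by
      rw [pv_hhmm_canon i hi j hj])).symm
  rw [PySem.List.foldl_congr_mem _ _
        (fun s i => PySem.Set.update s ((PySem.List.pyRange 0 60 1).map (pvCanon i))) _
        (fun acc x hx => h1 acc x hx),
      pv_foldl_update, show (PySem.Set.empty : PySem.Set (List Char)) = [] from rfl,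
      PySem.Set.update_nil_left]
  exact PySem.Set.ofList_eq_self_of_nodup _ pv_nodup_allT

-- A's per-time test, reduced to an index condition
theorem pv_step1 (l : List Char) (c0 c1 c2 c3 c4 : Char) :
  ((((PySem.List.enumerate l 0).filter (fun p => p.2 != '?')).map (·.1)).all
      (fun i => PySem.List.pyGet? [c0,c1,c2,c3,c4] i == PySem.List.pyGet? l i)) = true ↔
  (∀ (k:Nat) (h:k<l.length), l[k] ≠ '?' → [c0,c1,c2,c3,c4][k]? = some l[k]) := by
  rw [List.all_map, List.all_filter]
  simp [List.all_eq_true, PySem.List.mem_enumerate_iff, Function.comp]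
  constructor
  · intro H k h hk
    rcases H (↑k) l[k] k h rfl rfl with h' | h'
    · exact absurd h' hk
    · simpa [List.getElem?_eq_getElem h] using h'
  · intro H a b x hx ha hb
    subst ha; subst hb
    by_cases hq : l[x] = '?'
    · exact Or.inl hq
    · exact Or.inr (by simp [List.getElem?_eq_getElem hx, H x hx hq])

theorem pv_pvM_iff (l : List Char) (t : Nat) (c : Char) :
    pvM (l.getD t '?') c = true ↔ ∀ (h : t < l.length), l[t] ≠ '?' → l[t] = c := by
  by_cases h : t < l.length
  · rw [List.getD_eq_getElem?_getD, List.getElem?_eq_getElem h, Option.getD_some]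
    constructor
    · intro hm _ hq
      rcases (by simpa [pvM] using hm : l[t] = '?' ∨ l[t] = c) with h1 | h1
      · exact absurd h1 hq
      · exact h1
    · intro Hp
      by_cases hq : l[t] = '?'
      · simp [pvM, hq]
      · simp [pvM, Hp h hq]
  · have he : l.getD t '?' = '?' := by
      rw [List.getD_eq_getElem?_getD, List.getElem?_eq_none (by omega)]; rfl
    constructor
    · intro _ h' _; exact absurd h' h
    · intro _
      rw [List.getD_eq_getElem?_getD] at he
      simp [pvM, he]

theorem pv_drop_all_iff (l : List Char) :
    ((l.drop 5).all (· == '?') = true) ↔ ∀ (k : Nat) (h : k < l.length), 5 ≤ k → l[k] = '?' := by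
  simp [List.all_eq_true, List.mem_iff_getElem]
  constructor
  · intro H k hk h5
    have he : l[5 + (k - 5)]'(by omega) = l[k]'hk := by congr 1; omega
    exact H (l[k]'hk) (k - 5) (by omega) he
  · intro H c i hi heq
    rw [← heq]
    exact H (5 + i) (by omega) (by omega)

theorem pv_step2 (l : List Char) (c0 c1 c2 c3 c4 : Char) :
    (∀ (k:Nat) (h:k<l.length), l[k] ≠ '?' → [c0,c1,c2,c3,c4][k]? = some l[k]) ↔
    ((l.drop 5).all (· == '?') && (pvM (l.getD 0 '?') c0 && (pvM (l.getD 1 '?') c1 &&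
      (pvM (l.getD 2 '?') c2 && (pvM (l.getD 3 '?') c3 && pvM (l.getD 4 '?') c4))))) = true := by
  simp only [Bool.and_eq_true]
  constructor
  · intro H
    refine ⟨pv_drop_all_iff l |>.mpr ?_, (pv_pvM_iff l 0 c0).mpr ?_, (pv_pvM_iff l 1 c1).mpr ?_,
      (pv_pvM_iff l 2 c2).mpr ?_, (pv_pvM_iff l 3 c3).mpr ?_, (pv_pvM_iff l 4 c4).mpr ?_⟩
    · intro k hk h5
      by_contra hq
      have h2 := H k hk hq
      rw [List.getElem?_eq_none (by simp; omega)] at h2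
      simp at h2
    all_goals (intro h hk; have h2 := H _ h hk; simp at h2; exact h2.symm)
  · rintro ⟨hd, h0, h1, h2, h3, h4⟩ k hk hq
    match k with
    | 0 => simpa using ((pv_pvM_iff l 0 c0).mp h0 hk hq).symm
    | 1 => simpa using ((pv_pvM_iff l 1 c1).mp h1 hk hq).symm
    | 2 => simpa using ((pv_pvM_iff l 2 c2).mp h2 hk hq).symm
    | 3 => simpa using ((pv_pvM_iff l 3 c3).mp h3 hk hq).symm
    | 4 => simpa using ((pv_pvM_iff l 4 c4).mp h4 hk hq).symm
    | (n+5) => exact absurd ((pv_drop_all_iff l).mp hd (n+5) hk (by omega)) hq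

theorem pv_match_decomp (l : List Char) (c0 c1 c2 c3 c4 : Char) :
    ((((PySem.List.enumerate l 0).filter (fun p => p.2 != '?')).map (·.1)).all
      (fun i => PySem.List.pyGet? [c0,c1,c2,c3,c4] i == PySem.List.pyGet? l i))
    = ((l.drop 5).all (· == '?') && (pvM (l.getD 0 '?') c0 && (pvM (l.getD 1 '?') c1 &&
      (pvM (l.getD 2 '?') c2 && (pvM (l.getD 3 '?') c3 && pvM (l.getD 4 '?') c4))))) := by
  rw [Bool.eq_iff_iff]
  exact (pv_step1 l c0 c1 c2 c3 c4).trans (pv_step2 l c0 c1 c2 c3 c4)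

-- arithmetic shapes for the factorized sum
theorem pv_inner_sum (e a b c : Bool) (L : List Int) (p q : Int → Bool) :
    (L.map (fun j => if (e && (a && (b && (c && (p j && q j))))) = true then (1:Int) else 0)).sum
      = (if (e && (a && (b && c))) = true then (1:Int) else 0)
        * (L.countP (fun j => p j && q j) : Int) := by
  cases e <;> cases a <;> cases b <;> cases c
  case true.true.true.true =>
    simpa using PySem.List.sum_map_ite_one_zero (fun j => p j && q j) L
  all_goals simp

theorem pv_outer_sum (L : List Int) (h : Int → Bool) (M : Int) :
    (L.map (fun i => (if h i = true then (1:Int) else 0) * M)).sum = (L.countP h : Int) * M := by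
  rw [List.sum_map_mul_right, PySem.List.sum_map_ite_one_zero]

theorem pv_countP_factor (e c : Bool) (L : List Int) (a b : Int → Bool) :
    (L.countP (fun i => e && (a i && (b i && c))) : Int)
      = (if e = true then (1:Int) else 0) * (L.countP fun i => a i && b i : Int)
        * (if c = true then (1:Int) else 0) := by
  cases e <;> cases c <;> simp

theorem pv_toChars_digit : ∀ (d : Int), 0 ≤ d → d < 10 → PySem.Int.toChars d = [pvD d] := by
  intro d h1 h2
  interval_cases d <;> rfl

theorem pv_pvIn2_single (c x : Char) : pvIn2 c [x] = pvM c x := by simp [pvIn2, pvM]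

theorem pv_pad_getD (l : List Char) (k : Nat) (hk : k < 5) :
    (PySem.List.slice (l ++ ['?','?','?','?','?']) none (some 5)).getD k '?' = l.getD k '?' := by
  rw [PySem.List.slice_to _ (by norm_num), show ((5:Int).toNat) = 5 from rfl,
    List.getD_eq_getElem?_getD, List.getD_eq_getElem?_getD, List.getElem?_take, if_pos hk,
    List.getElem?_append]
  by_cases hl : k < l.length
  · rw [if_pos hl]
  · rw [if_neg hl]
    have h5 : ∀ m, m < 5 → (['?','?','?','?','?'] : List Char)[m]? = some '?' := by decide
    rw [h5 _ (by omega), List.getElem?_eq_none (show l.length ≤ k by omega)]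
    rfl

-- B, written as the countP product over the pattern's first five characters
theorem pv_alt_eq (time : String) :
    countTime_alt time
      = ((PySem.List.pyRange 0 24 1).countP
            (pvHourP (time.toList.getD 0 '?') (time.toList.getD 1 '?')) : Int)
        * (if pvM (time.toList.getD 2 '?') ':' = true then (1:Int) else 0)
        * ((PySem.List.pyRange 0 60 1).countP
            (pvMinP (time.toList.getD 3 '?') (time.toList.getD 4 '?')) : Int) := by
  simp only [countTime_alt, pv_pad_getD _ 0 (by omega), pv_pad_getD _ 1 (by omega),
    pv_pad_getD _ 2 (by omega), pv_pad_getD _ 3 (by omega), pv_pad_getD _ 4 (by omega),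
    pv_pvIn2_single]
  have hhour : ∀ h ∈ PySem.List.pyRange 0 24 1,
      (pvIn2 (time.toList.getD 0 '?') (PySem.Int.toChars (PySem.Int.floordiv h 10)) &&
       pvIn2 (time.toList.getD 1 '?') (PySem.Int.toChars (PySem.Int.mod h 10)))
      = pvHourP (time.toList.getD 0 '?') (time.toList.getD 1 '?') h := by
    intro h hm
    rw [PySem.List.mem_pyRange_one] at hm
    obtain ⟨hm1, hm2⟩ := hm
    rw [pv_toChars_digit _
          (by rw [PySem.Int.le_floordiv_iff_mul_le (by norm_num : (0:Int) < 10)]; omega)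
          (by rw [PySem.Int.floordiv_lt_iff_lt_mul (by norm_num : (0:Int) < 10)]; omega),
        pv_toChars_digit _ (PySem.Int.mod_nonneg h (by norm_num)) (PySem.Int.mod_lt h (by norm_num)),
        pv_pvIn2_single, pv_pvIn2_single, pvHourP]
  have hmin : ∀ m ∈ PySem.List.pyRange 0 60 1,
      (pvIn2 (time.toList.getD 3 '?') (PySem.Int.toChars (PySem.Int.floordiv m 10)) &&
       pvIn2 (time.toList.getD 4 '?') (PySem.Int.toChars (PySem.Int.mod m 10)))
      = pvMinP (time.toList.getD 3 '?') (time.toList.getD 4 '?') m := by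
    intro m hm
    rw [PySem.List.mem_pyRange_one] at hm
    obtain ⟨hm1, hm2⟩ := hm
    rw [pv_toChars_digit _
          (by rw [PySem.Int.le_floordiv_iff_mul_le (by norm_num : (0:Int) < 10)]; omega)
          (by rw [PySem.Int.floordiv_lt_iff_lt_mul (by norm_num : (0:Int) < 10)]; omega),
        pv_toChars_digit _ (PySem.Int.mod_nonneg m (by norm_num)) (PySem.Int.mod_lt m (by norm_num)),
        pv_pvIn2_single, pv_pvIn2_single, pvMinP]
  have hc1 := List.countP_congr (l := PySem.List.pyRange 0 24 1)
    (p := fun h => pvIn2 (time.toList.getD 0 '?') (PySem.Int.toChars (PySem.Int.floordiv h 10)) &&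
      pvIn2 (time.toList.getD 1 '?') (PySem.Int.toChars (PySem.Int.mod h 10)))
    (q := pvHourP (time.toList.getD 0 '?') (time.toList.getD 1 '?'))
    (fun x hx => by beta_reduce; rw [hhour x hx])
  have hc2 := List.countP_congr (l := PySem.List.pyRange 0 60 1)
    (p := fun m => pvIn2 (time.toList.getD 3 '?') (PySem.Int.toChars (PySem.Int.floordiv m 10)) &&
      pvIn2 (time.toList.getD 4 '?') (PySem.Int.toChars (PySem.Int.mod m 10)))
    (q := pvMinP (time.toList.getD 3 '?') (time.toList.getD 4 '?'))
    (fun x hx => by beta_reduce; rw [hmin x hx])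
  rw [hc1, hc2]

-- A's value is B's value gated by "everything past index 4 is a wildcard"
theorem pv_sum_flatMap (L : List Int) (g : Int → List Int) :
    (L.flatMap g).sum = (L.map (fun i => (g i).sum)).sum := by
  rw [List.flatMap_def, List.sum_flatten, List.map_map]
  rfl

theorem pv_countA_eq (time : String) :
    countTime time
      = (if (time.toList.drop 5).all (· == '?') = true then (1:Int) else 0)
        * countTime_alt time := by
  simp only [countTime]
  rw [pv_total_eq]
  rw [show ((PySem.List.enumerate time.toList 0).foldl
        (fun l p => if p.2 != '?' then l ++ [p.1] else l) [])
      = (((PySem.List.enumerate time.toList 0).filter (fun p => p.2 != '?')).map (·.1)) from by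
    rw [PySem.List.foldl_append_if (fun p : Int × Char => p.2 != '?')
      (fun p : Int × Char => p.1) (PySem.List.enumerate time.toList 0) []]
    simp]
  rw [PySem.List.foldl_add pvAllT
    (fun curr => if (((PySem.List.enumerate time.toList 0).filter (fun p => p.2 != '?')).map (·.1)).all
        (fun i => PySem.List.pyGet? curr i == PySem.List.pyGet? time.toList i) then (1:Int) else 0) 0]
  rw [pv_alt_eq]
  simp only [pvAllT, List.map_flatMap, List.map_map]
  rw [pv_sum_flatMap]
  simp only [Function.comp_def, pvCanon, pv_match_decomp]
  simp only [pv_inner_sum, pv_outer_sum, pv_countP_factor]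
  have e1 : (PySem.List.pyRange 0 24 1).countP
        (pvHourP (time.toList.getD 0 '?') (time.toList.getD 1 '?'))
      = (PySem.List.pyRange 0 24 1).countP (fun i =>
          pvM (time.toList.getD 0 '?') (pvD (PySem.Int.floordiv i 10)) &&
          pvM (time.toList.getD 1 '?') (pvD (PySem.Int.mod i 10))) := rfl
  have e2 : (PySem.List.pyRange 0 60 1).countP
        (pvMinP (time.toList.getD 3 '?') (time.toList.getD 4 '?'))
      = (PySem.List.pyRange 0 60 1).countP (fun j =>
          pvM (time.toList.getD 3 '?') (pvD (PySem.Int.floordiv j 10)) &&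
          pvM (time.toList.getD 4 '?') (pvD (PySem.Int.mod j 10))) := rfl
  rw [e1, e2]
  ring

-- characters compatible with a real hour / minute digit pair satisfy the char-class tests
theorem pv_hour_char (t0 t1 a b : Char)
    (ha : (a = '0' ∨ a = '1') ∨ (a = '2' ∧ (b = '?' ∨ b = '0' ∨ b = '1' ∨ b = '2' ∨ b = '3')))
    (hb : '0' ≤ b ∧ b ≤ '9')
    (hp : (pvM t0 a && pvM t1 b) = true) : pvSatHour t0 t1 = true := by
  simp only [pvM, Bool.and_eq_true, Bool.or_eq_true, beq_iff_eq] at hp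
  obtain ⟨h0, h1⟩ := hp
  have hb0 : (t1 == '?' || ('0' ≤ t1 && t1 ≤ '9')) = true := by
    rcases h1 with h1 | h1
    · simp [h1]
    · simp [h1, hb.1, hb.2]
  rcases h0 with h0 | h0
  · rcases ha with (ha | ha) | ⟨ha, _⟩ <;> simp [pvSatHour, h0, hb0]
  · subst h0
    rcases ha with (ha | ha) | ⟨ha, hab⟩ <;> subst ha <;> simp [pvSatHour, hb0]
    rcases h1 with h1 | h1
    · simp [h1]
    · subst h1
      rcases hab with h | h | h | h | h <;> simp [h]

theorem pv_min_char (t3 t4 a b : Char)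
    (ha : '0' ≤ a ∧ a ≤ '5') (hb : '0' ≤ b ∧ b ≤ '9')
    (hp : (pvM t3 a && pvM t4 b) = true) : pvSatMin t3 t4 = true := by
  simp only [pvM, Bool.and_eq_true, Bool.or_eq_true, beq_iff_eq] at hp
  obtain ⟨h0, h1⟩ := hp
  have h3 : (t3 == '?' || ('0' ≤ t3 && t3 ≤ '5')) = true := by
    rcases h0 with h0 | h0
    · simp [h0]
    · subst h0; simp [ha.1, ha.2]
  have h4 : (t4 == '?' || ('0' ≤ t4 && t4 ≤ '9')) = true := by
    rcases h1 with h1 | h1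
    · simp [h1]
    · subst h1; simp [hb.1, hb.2]
  simp [pvSatMin, h3, h4]

theorem pv_hour_zero (t0 t1 : Char) (hs : pvSatHour t0 t1 = false) :
    (PySem.List.pyRange 0 24 1).countP (pvHourP t0 t1) = 0 := by
  rw [List.countP_eq_zero]
  intro h hm
  rw [PySem.List.mem_pyRange_one] at hm
  intro hp
  obtain ⟨h1, h2⟩ := hm
  have hsat : pvSatHour t0 t1 = true := by
    interval_cases h <;>
      exact pv_hour_char t0 t1 _ _ (by decide) (by decide) hp
  rw [hs] at hsat
  exact Bool.noConfusion hsat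

theorem pv_min_zero (t3 t4 : Char) (hs : pvSatMin t3 t4 = false) :
    (PySem.List.pyRange 0 60 1).countP (pvMinP t3 t4) = 0 := by
  rw [List.countP_eq_zero]
  intro m hm
  rw [PySem.List.mem_pyRange_one] at hm
  intro hp
  obtain ⟨h1, h2⟩ := hm
  have hsat : pvSatMin t3 t4 = true := by
    interval_cases m <;>
      exact pv_min_char t3 t4 _ _ (by decide) (by decide) hp
  rw [hs] at hsat
  exact Bool.noConfusion hsat

-- if no time is compatible with the first five pattern characters, B returns 0
theorem pv_alt_zero (time : String) (hs : pvSat time.toList = false) : countTime_alt time = 0 := by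
  rw [pv_alt_eq]
  simp only [pvSat, Bool.and_eq_false_iff] at hs
  rcases hs with (hs | hs) | hs
  · rw [pv_hour_zero _ _ hs]; push_cast; ring
  · have : pvM (time.toList.getD 2 '?') ':' = false := by
      simpa [pvM] using hs
    rw [this]; simp
  · rw [pv_min_zero _ _ hs]; push_cast; ring

-- ===== VERDICT (by name: the statement is the Claim_ definition above) =====
theorem countTime_spec : Claim_equal_countTime := by
  intro time _ hpre
  unfold Spec_countTime
  rw [pv_countA_eq]
  by_cases he : (time.toList.drop 5).all (· == '?') = true
  · rw [he]; simp
  · rcases hpre with hp | hp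
    · exact absurd hp he
    · rw [pv_alt_zero time hp]
      simp
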